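-- pv_equiv track=rewrite | github.com/YoSazo/Project-Memory | benchmarks/locomo/run_memla_benchmark.py | _parse_evidence_list
-- ===== SOURCE A (Python) =====
-- from typing import Any
--
-- def _parse_evidence_list(raw_evidence: Any) -> list[str]:
--     if isinstance(raw_evidence, str):
--         raw_evidence = [raw_evidence]
--     out: list[str] = []
--     for item in raw_evidence or []:
--         for part in str(item).split(";"):
--             part = part.strip()
--             if part:
--                 out.append(part)
--     return out
-- ===== SOURCE B (Python) =====
-- from typing import Any
--
-- def _parse_evidence_list(raw_evidence: Any) -> list[str]:
--     # Character-level state machine: one scan per item, no split()/strip().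
--     # `cur` holds the current token already left-trimmed; `pend` holds a run of
--     # interior whitespace that is only committed when a further non-space char
--     # arrives (so trailing whitespace is dropped for free).
--     if isinstance(raw_evidence, str):
--         raw_evidence = [raw_evidence]
--     out: list[str] = []
--     for item in raw_evidence or []:
--         cur = ""
--         pend = ""
--         for ch in str(item):
--             if ch == ";":
--                 if cur:
--                     out.append(cur)
--                 cur = ""
--                 pend = ""
--             elif ch.isspace():
--                 if cur:
--                     pend += ch
--             else:
--                 cur += pend + ch
--                 pend = ""
--         if cur:
--             out.append(cur)
--     return out
-- ===== Notes on version B (the rewrite author's own statement) =====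
-- stated objective: alternative
-- what changed: Replaces A's split-on-';'-then-strip-each-part pipeline with a character-level state machine: one scan per item carrying a current-token buffer and a pending-whitespace buffer, so no split() or strip() call is made at all.
import Mathlib
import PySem

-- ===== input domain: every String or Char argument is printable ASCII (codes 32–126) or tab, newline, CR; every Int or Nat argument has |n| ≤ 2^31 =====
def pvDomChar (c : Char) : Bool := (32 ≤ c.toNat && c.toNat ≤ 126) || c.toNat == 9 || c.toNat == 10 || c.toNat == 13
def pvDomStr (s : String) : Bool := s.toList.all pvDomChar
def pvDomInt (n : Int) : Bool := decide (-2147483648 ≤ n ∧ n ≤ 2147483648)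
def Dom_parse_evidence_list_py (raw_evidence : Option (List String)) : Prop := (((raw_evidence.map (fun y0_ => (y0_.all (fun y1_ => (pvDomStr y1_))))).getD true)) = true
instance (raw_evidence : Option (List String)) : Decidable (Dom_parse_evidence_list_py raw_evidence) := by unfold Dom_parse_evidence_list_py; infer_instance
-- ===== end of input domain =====

-- B replaces A's split/strip pipeline by a character-level state machine: one scan per
-- item with a current-token and pending-whitespace buffer; no split or strip calls.

-- ===== PORT A =====
-- Nested loop: for each item, split on ";", strip each part, append non-empty parts.
-- String ops are ported on List Char via PySem.Chars (exact; Str functions are thin wrappers).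
def parse_evidence_list_py (raw_evidence : Option (List String)) : List String :=
  (raw_evidence.getD []).foldl (fun out item =>
    (PySem.Chars.splitOn item.toList [';']).foldl (fun out part =>
      let p := PySem.Chars.strip part
      if p ≠ [] then out ++ [String.ofList p] else out) out) []

-- ===== PORT B =====
-- Character scan per item: state (out, cur, pend); ';' flushes cur (if non-empty),
-- whitespace is buffered in pend only while cur is non-empty, a non-space char commits
-- pend + char into cur; end of item flushes cur.  isspace is Python's ch.isspace().
def parse_evidence_list_py_alt (raw_evidence : Option (List String)) : List String :=
  (raw_evidence.getD []).foldl (fun out item =>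
    let st := item.toList.foldl (fun (st : List String × List Char × List Char) ch =>
      if ch = ';' then
        ((if st.2.1 ≠ [] then st.1 ++ [String.ofList st.2.1] else st.1), [], [])
      else if PySem.Chars.isspace ch then
        (st.1, st.2.1, if st.2.1 ≠ [] then st.2.2 ++ [ch] else st.2.2)
      else
        (st.1, st.2.1 ++ st.2.2 ++ [ch], [])) (out, [], [])
    if st.2.1 ≠ [] then st.1 ++ [String.ofList st.2.1] else st.1) []

-- ===== PRECONDITION & SPEC =====
def Spec_parse_evidence_list_py (raw_evidence : Option (List String)) (out : List String) : Prop := out = parse_evidence_list_py_alt raw_evidence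
instance (raw_evidence : Option (List String)) (out : List String) : Decidable (Spec_parse_evidence_list_py raw_evidence out) := by unfold Spec_parse_evidence_list_py; infer_instance

-- ===== CLAIM (what is proved, stated in full; the proofs are below) =====
def Claim_equal_parse_evidence_list_py : Prop := ∀ (raw_evidence : Option (List String)), Dom_parse_evidence_list_py raw_evidence → Spec_parse_evidence_list_py raw_evidence (parse_evidence_list_py raw_evidence)

-- ===== LEMMAS AND PROOFS =====

-- simple accumulator form of split-on-';' (proof helper only)
def pvGoC : List Char → List Char → List (List Char)
  | [], cur => [cur.reverse]
  | c :: rest, cur => if c = ';' then cur.reverse :: pvGoC rest [] else pvGoC rest (c :: cur)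

theorem pvGo_eq (fuel : Nat) (l cur : List Char) (acc : List (List Char)) (h : l.length < fuel) :
    PySem.Chars.splitOn.go [';'] fuel l cur acc = acc.reverse ++ pvGoC l cur := by
  induction fuel generalizing l cur acc with
  | zero => omega
  | succ n ih =>
    cases l with
    | nil => simp [PySem.Chars.splitOn.go, pvGoC]
    | cons c rest =>
      by_cases hc : c = ';'
      · subst hc
        simp only [PySem.Chars.splitOn.go]
        rw [if_pos (by simp [List.isPrefixOf])]
        simp only [List.length_cons, List.length_nil, Nat.zero_add, List.drop_succ_cons,
          List.drop_zero]
        rw [ih rest [] (cur.reverse :: acc) (by simp at h; omega)]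
        simp [pvGoC]
      · simp only [PySem.Chars.splitOn.go]
        rw [if_neg (by simp [List.isPrefixOf]; exact fun h' => hc h'.symm),
          ih rest (c :: cur) acc (by simp at h; omega)]
        simp [pvGoC, hc]

theorem pvSplitOn_eq (s : List Char) : PySem.Chars.splitOn s [';'] = pvGoC s [] := by
  simpa using pvGo_eq (s.length + 1) s [] [] (by omega)

-- how one split piece is stripped and filtered (both programs do this to each piece)
def pvStripper (part : List Char) : Option String :=
  if PySem.Chars.strip part = [] then none else some (String.ofList (PySem.Chars.strip part))

-- the per-item contribution
def pvPiece (item : String) : List String :=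
  (PySem.Chars.splitOn item.toList [';']).filterMap pvStripper

theorem pvInner (parts : List (List Char)) (out : List String) :
    parts.foldl (fun out part =>
      let p := PySem.Chars.strip part
      if p ≠ [] then out ++ [String.ofList p] else out) out
    = out ++ parts.filterMap pvStripper := by
  induction parts generalizing out with
  | nil => simp
  | cons q rest ih =>
    rw [List.foldl_cons, ih]
    by_cases hq : PySem.Chars.strip q = [] <;> simp [hq, pvStripper]

theorem pvA_flat (items : List String) :
    items.foldl (fun out item =>
      (PySem.Chars.splitOn item.toList [';']).foldl (fun out part =>
        let p := PySem.Chars.strip part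
        if p ≠ [] then out ++ [String.ofList p] else out) out) []
    = items.flatMap pvPiece := by
  have : ∀ (items : List String) (acc : List String),
      items.foldl (fun out item =>
        (PySem.Chars.splitOn item.toList [';']).foldl (fun out part =>
          let p := PySem.Chars.strip part
          if p ≠ [] then out ++ [String.ofList p] else out) out) acc
      = acc ++ items.flatMap pvPiece := by
    intro items
    induction items with
    | nil => simp
    | cons x rest ih =>
      intro acc
      rw [List.foldl_cons, pvInner, ih]
      simp [pvPiece]
  simpa using this items []

-- dropping an all-whitespace prefix
theorem pvDropWhile_ws_append (w x : List Char) (hw : ∀ c ∈ w, PySem.Chars.isspace c = true) :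
    (w ++ x).dropWhile PySem.Chars.isspace = x.dropWhile PySem.Chars.isspace := by
  induction w with
  | nil => simp
  | cons a t ih =>
    simp only [List.cons_append, List.dropWhile_cons, hw a (by simp)]
    exact ih (fun c hc => hw c (by simp [hc]))

-- strip of (ws ++ cur ++ ws) is cur, when cur starts and ends with a non-space char
theorem pvStrip_sandwich (w cur p : List Char)
    (hw : ∀ c ∈ w, PySem.Chars.isspace c = true)
    (hp : ∀ c ∈ p, PySem.Chars.isspace c = true)
    (hcp : cur = [] → p = [])
    (hh : ∀ a ∈ cur.head?, PySem.Chars.isspace a = false)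
    (hl : ∀ a ∈ cur.getLast?, PySem.Chars.isspace a = false) :
    PySem.Chars.strip (w ++ cur ++ p) = cur := by
  cases cur with
  | nil =>
    have hpnil := hcp rfl
    subst hpnil
    have hwnil : w.dropWhile PySem.Chars.isspace = [] :=
      List.dropWhile_eq_nil_iff.mpr (fun c hc => hw c hc)
    simp [PySem.Chars.strip, PySem.Chars.lstrip, PySem.Chars.rstrip, hwnil]
  | cons a t =>
    have ha : PySem.Chars.isspace a = false := hh a (by simp)
    unfold PySem.Chars.strip PySem.Chars.lstrip PySem.Chars.rstrip
    rw [List.append_assoc, pvDropWhile_ws_append w ((a :: t) ++ p) hw]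
    rw [List.cons_append, List.dropWhile_cons, ha]
    simp only [Bool.false_eq_true, if_false]
    rw [← List.cons_append, List.reverse_append,
      pvDropWhile_ws_append p.reverse (a :: t).reverse
        (fun c hc => hp c (by simpa using hc))]
    obtain ⟨s, b, hs⟩ : ∃ s b, a :: t = s ++ [b] :=
      ⟨(a :: t).dropLast, (a :: t).getLast (by simp), by
        simpa using (List.dropLast_append_getLast (l := a :: t) (by simp)).symm⟩
    have hb : PySem.Chars.isspace b = false := by
      apply hl
      rw [hs]
      simp
    rw [hs]
    simp [hb]

-- proof-side names for B's per-character step and end-of-item flush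
def pvStep (st : List String × List Char × List Char) (ch : Char) :
    List String × List Char × List Char :=
  if ch = ';' then
    ((if st.2.1 ≠ [] then st.1 ++ [String.ofList st.2.1] else st.1), [], [])
  else if PySem.Chars.isspace ch then
    (st.1, st.2.1, if st.2.1 ≠ [] then st.2.2 ++ [ch] else st.2.2)
  else
    (st.1, st.2.1 ++ st.2.2 ++ [ch], [])

def pvFlush (st : List String × List Char × List Char) : List String :=
  if st.2.1 ≠ [] then st.1 ++ [String.ofList st.2.1] else st.1

-- the state machine on one item equals strip/filter over the ';'-pieces:
-- pvGoC's accumulator carries the reversed current piece = skipped leading ws ++ cur ++ pend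
theorem pvRun (l : List Char) (out : List String) (w cur pend : List Char)
    (hw : ∀ c ∈ w, PySem.Chars.isspace c = true)
    (hp : ∀ c ∈ pend, PySem.Chars.isspace c = true)
    (hcp : cur = [] → pend = [])
    (hh : ∀ a ∈ cur.head?, PySem.Chars.isspace a = false)
    (hl : ∀ a ∈ cur.getLast?, PySem.Chars.isspace a = false) :
    pvFlush (l.foldl pvStep (out, cur, pend))
    = out ++ (pvGoC l ((w ++ cur ++ pend).reverse)).filterMap pvStripper := by
  induction l generalizing out w cur pend with
  | nil =>
    have hstrip := pvStrip_sandwich w cur pend hw hp hcp hh hl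
    simp only [List.foldl_nil, pvFlush, pvGoC, List.reverse_reverse, List.filterMap_cons,
      List.filterMap_nil, pvStripper, hstrip]
    cases cur with
    | nil => simp
    | cons a t => simp
  | cons c rest ih =>
    by_cases hc : c = ';'
    · subst hc
      have hstrip := pvStrip_sandwich w cur pend hw hp hcp hh hl
      have hstep : pvStep (out, cur, pend) ';' =
          ((if cur ≠ [] then out ++ [String.ofList cur] else out), [], []) := by
        simp [pvStep]
      rw [List.foldl_cons, hstep,
        ih (if cur ≠ [] then out ++ [String.ofList cur] else out) [] [] []
          (by simp) (by simp) (fun _ => rfl) (by simp) (by simp)]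
      rw [show pvGoC (';' :: rest) ((w ++ cur ++ pend).reverse)
            = (w ++ cur ++ pend) :: pvGoC rest [] by simp [pvGoC]]
      simp only [List.filterMap_cons, pvStripper, hstrip]
      cases cur with
      | nil => simp
      | cons a t => simp
    · by_cases hsp : PySem.Chars.isspace c = true
      · cases hcur : cur with
        | nil =>
          have hpnil := hcp hcur
          subst hcur hpnil
          have hstep : pvStep (out, ([] : List Char), ([] : List Char)) c = (out, [], []) := by
            simp [pvStep, hc, hsp]
          rw [List.foldl_cons, hstep,
            ih out (w ++ [c]) [] []
              (by intro x hx; rcases List.mem_append.mp hx with h | h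
                  · exact hw x h
                  · simp at h; subst h; exact hsp)
              (by simp) (fun _ => rfl) (by simp) (by simp)]
          simp [pvGoC, hc]
        | cons a t =>
          subst hcur
          have hstep : pvStep (out, a :: t, pend) c = (out, a :: t, pend ++ [c]) := by
            simp [pvStep, hc, hsp]
          rw [List.foldl_cons, hstep,
            ih out w (a :: t) (pend ++ [c])
              hw
              (by intro x hx; rcases List.mem_append.mp hx with h | h
                  · exact hp x h
                  · simp at h; subst h; exact hsp)
              (by simp) hh hl]
          simp [pvGoC, hc]
      · have hsp' : PySem.Chars.isspace c = false := by
          cases h : PySem.Chars.isspace c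
          · rfl
          · exact absurd h hsp
        have hstep : pvStep (out, cur, pend) c = (out, cur ++ pend ++ [c], []) := by
          simp [pvStep, hc, hsp']
        rw [List.foldl_cons, hstep,
          ih out w (cur ++ pend ++ [c]) []
            hw (by simp) (by simp) ?_ (by simp [hsp'])]
        · simp [pvGoC, hc]
        · intro a ha
          cases hcur : cur with
          | nil =>
            have hpnil := hcp hcur
            subst hcur hpnil
            simp at ha
            subst ha
            exact hsp'
          | cons b t =>
            subst hcur
            simp only [List.cons_append, List.head?_cons, Option.mem_some_iff] at ha
            subst ha
            exact hh b (by simp)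

-- B's per-item body appends exactly the item's pieces
theorem pvB_item (item : String) (out : List String) :
    (let st := item.toList.foldl (fun (st : List String × List Char × List Char) ch =>
        if ch = ';' then
          ((if st.2.1 ≠ [] then st.1 ++ [String.ofList st.2.1] else st.1), [], [])
        else if PySem.Chars.isspace ch then
          (st.1, st.2.1, if st.2.1 ≠ [] then st.2.2 ++ [ch] else st.2.2)
        else
          (st.1, st.2.1 ++ st.2.2 ++ [ch], [])) (out, [], [])
     if st.2.1 ≠ [] then st.1 ++ [String.ofList st.2.1] else st.1)
    = out ++ pvPiece item := by
  have h := pvRun item.toList out [] [] [] (by simp) (by simp) (fun _ => rfl) (by simp) (by simp)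
  have hform : (let st := item.toList.foldl (fun (st : List String × List Char × List Char) ch =>
        if ch = ';' then
          ((if st.2.1 ≠ [] then st.1 ++ [String.ofList st.2.1] else st.1), [], [])
        else if PySem.Chars.isspace ch then
          (st.1, st.2.1, if st.2.1 ≠ [] then st.2.2 ++ [ch] else st.2.2)
        else
          (st.1, st.2.1 ++ st.2.2 ++ [ch], [])) (out, [], [])
      if st.2.1 ≠ [] then st.1 ++ [String.ofList st.2.1] else st.1)
      = pvFlush (item.toList.foldl pvStep (out, [], [])) := rfl
  rw [hform, h]
  simp [pvPiece, pvSplitOn_eq]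

theorem pvB_flat (items : List String) :
    items.foldl (fun out item =>
      let st := item.toList.foldl (fun (st : List String × List Char × List Char) ch =>
        if ch = ';' then
          ((if st.2.1 ≠ [] then st.1 ++ [String.ofList st.2.1] else st.1), [], [])
        else if PySem.Chars.isspace ch then
          (st.1, st.2.1, if st.2.1 ≠ [] then st.2.2 ++ [ch] else st.2.2)
        else
          (st.1, st.2.1 ++ st.2.2 ++ [ch], [])) (out, [], [])
      if st.2.1 ≠ [] then st.1 ++ [String.ofList st.2.1] else st.1) []
    = items.flatMap pvPiece := by
  have key : ∀ (items : List String) (acc : List String),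
      items.foldl (fun out item =>
        let st := item.toList.foldl (fun (st : List String × List Char × List Char) ch =>
          if ch = ';' then
            ((if st.2.1 ≠ [] then st.1 ++ [String.ofList st.2.1] else st.1), [], [])
          else if PySem.Chars.isspace ch then
            (st.1, st.2.1, if st.2.1 ≠ [] then st.2.2 ++ [ch] else st.2.2)
          else
            (st.1, st.2.1 ++ st.2.2 ++ [ch], [])) (out, [], [])
        if st.2.1 ≠ [] then st.1 ++ [String.ofList st.2.1] else st.1) acc
      = acc ++ items.flatMap pvPiece := by
    intro items
    induction items with
    | nil => simp
    | cons x rest ih =>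
      intro acc
      rw [List.foldl_cons, pvB_item, ih]
      simp
  simpa using key items []

-- ===== VERDICT (by name: the statement is the Claim_ definition above) =====
theorem parse_evidence_list_py_spec : Claim_equal_parse_evidence_list_py := by
  intro raw_evidence _
  unfold Spec_parse_evidence_list_py parse_evidence_list_py parse_evidence_list_py_alt
  rw [pvA_flat, pvB_flat]
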